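-- pv_equiv track=rewrite | github.com/kenlacroix/InsightVault | backend/app/api/chat.py | generate_follow_up_prompts
-- ===== SOURCE A (Python) =====
-- def generate_follow_up_prompts(user_question: str, analysis_context: str, detected_topics: dict) -> list:
--     """
--     Generate contextual follow-up prompts based on the user's question and analysis context.
--     """
--     follow_ups = []
--     question_lower = user_question.lower()
--
--     # Sentiment-related follow-ups
--     if any(word in question_lower for word in ['sentiment', 'positive', 'negative', 'mood', 'emotion', 'mindset']):
--         follow_ups.extend([
--             "How has your emotional state evolved over time across different topics?",
--             "What patterns do you see in your most positive vs challenging conversations?",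
--             "How does your positive mindset influence your learning and growth patterns?",
--             "Would you like to explore the connection between your emotional state and productivity?"
--         ])
--
--     # Programming-related follow-ups
--     if any(word in question_lower for word in ['programming', 'code', 'technical', 'development']) or 'programming' in detected_topics:
--         follow_ups.extend([
--             "How has your programming confidence evolved over time?",
--             "What connections do you see between your programming skills and other life areas?",
--             "How do your programming discussions reflect your problem-solving approach?",
--             "Would you like to analyze your learning progression in specific technologies?"
--         ])
--
--     # Spiritual/personal growth follow-ups
--     if any(word in question_lower for word in ['spiritual', 'growth', 'development', 'personal', 'mindset']) or 'spirituality' in detected_topics: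
--         follow_ups.extend([
--             "How do your different interests contribute to your personal growth?",
--             "What patterns do you see in your self-reflection and learning journey?",
--             "How has your perspective on life evolved through your conversations?",
--             "Would you like to explore the balance between different aspects of your life?"
--         ])
--
--     # Relationship follow-ups
--     if any(word in question_lower for word in ['relationship', 'social', 'connection', 'people']) or 'relationships' in detected_topics:
--         follow_ups.extend([
--             "How do your relationship discussions reflect your communication style?",
--             "What patterns do you see in your social interactions and connections?",
--             "How do your relationships influence your other areas of interest?",
--             "Would you like to explore your approach to conflict resolution and understanding?"
--         ])
--
--     # Health/wellness follow-ups
--     if any(word in question_lower for word in ['health', 'wellness', 'fitness', 'wellbeing']) or 'health' in detected_topics: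
--         follow_ups.extend([
--             "How do your health discussions connect to your overall lifestyle patterns?",
--             "What does your approach to wellness tell you about your priorities?",
--             "How has your understanding of health and wellbeing evolved?",
--             "Would you like to explore the connection between physical and mental wellbeing?"
--         ])
--
--     # Business/career follow-ups
--     if any(word in question_lower for word in ['business', 'career', 'work', 'professional']) or 'business' in detected_topics:
--         follow_ups.extend([
--             "How do your business interests align with your personal values?",
--             "What patterns do you see in your professional development?",
--             "How has your approach to work and career evolved over time?",
--             "Would you like to explore the balance between professional and personal growth?"
--         ])
--
--     # Creativity follow-ups
--     if any(word in question_lower for word in ['creative', 'art', 'creativity', 'expression']) or 'creativity' in detected_topics: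
--         follow_ups.extend([
--             "How does your creativity influence your other areas of interest?",
--             "What patterns do you see in your creative expression and inspiration?",
--             "How has your creative process evolved through your conversations?",
--             "Would you like to explore the connection between creativity and problem-solving?"
--         ])
--
--     # Cross-topic connection follow-ups
--     if len(detected_topics) > 2:
--         follow_ups.extend([
--             "How do your different interests connect and influence each other?",
--             "What patterns do you see across your various areas of discussion?",
--             "How does your diverse range of interests contribute to your overall growth?",
--             "Would you like to explore how your different passions complement each other?"
--         ])
--
--     # General growth and pattern follow-ups
--     follow_ups.extend([
--         "What trends do you notice in your conversation topics over time?",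
--         "How has your approach to learning and exploration evolved?",
--         "What does your conversation history reveal about your core values?",
--         "Would you like to explore specific breakthroughs or turning points in your journey?"
--     ])
--
--     # Remove duplicates and limit to 4-6 most relevant
--     unique_follow_ups = list(dict.fromkeys(follow_ups))  # Preserve order while removing duplicates
--     return unique_follow_ups[:6]
-- ===== SOURCE B (Python) =====
-- def generate_follow_up_prompts(user_question: str, analysis_context: str, detected_topics: dict) -> list:
--     """Streaming with early cut-off: all 36 prompts are pairwise distinct, so A's
--     dedup is a no-op and the answer is the first 6 prompts of the fired blocks.
--     We lazily walk the blocks and stop as soon as 6 prompts are collected,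
--     never building the full list, never deduplicating, and never evaluating
--     conditions for blocks that cannot contribute."""
--     q = user_question.lower()
--
--     def fired_blocks():
--         if any(w in q for w in ('sentiment', 'positive', 'negative', 'mood', 'emotion', 'mindset')):
--             yield [
--                 "How has your emotional state evolved over time across different topics?",
--                 "What patterns do you see in your most positive vs challenging conversations?",
--                 "How does your positive mindset influence your learning and growth patterns?",
--                 "Would you like to explore the connection between your emotional state and productivity?",
--             ]
--         if any(w in q for w in ('programming', 'code', 'technical', 'development')) or 'programming' in detected_topics:
--             yield [
--                 "How has your programming confidence evolved over time?",
--                 "What connections do you see between your programming skills and other life areas?",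
--                 "How do your programming discussions reflect your problem-solving approach?",
--                 "Would you like to analyze your learning progression in specific technologies?",
--             ]
--         if any(w in q for w in ('spiritual', 'growth', 'development', 'personal', 'mindset')) or 'spirituality' in detected_topics:
--             yield [
--                 "How do your different interests contribute to your personal growth?",
--                 "What patterns do you see in your self-reflection and learning journey?",
--                 "How has your perspective on life evolved through your conversations?",
--                 "Would you like to explore the balance between different aspects of your life?",
--             ]
--         if any(w in q for w in ('relationship', 'social', 'connection', 'people')) or 'relationships' in detected_topics:
--             yield [
--                 "How do your relationship discussions reflect your communication style?",
--                 "What patterns do you see in your social interactions and connections?",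
--                 "How do your relationships influence your other areas of interest?",
--                 "Would you like to explore your approach to conflict resolution and understanding?",
--             ]
--         if any(w in q for w in ('health', 'wellness', 'fitness', 'wellbeing')) or 'health' in detected_topics:
--             yield [
--                 "How do your health discussions connect to your overall lifestyle patterns?",
--                 "What does your approach to wellness tell you about your priorities?",
--                 "How has your understanding of health and wellbeing evolved?",
--                 "Would you like to explore the connection between physical and mental wellbeing?",
--             ]
--         if any(w in q for w in ('business', 'career', 'work', 'professional')) or 'business' in detected_topics:
--             yield [
--                 "How do your business interests align with your personal values?",
--                 "What patterns do you see in your professional development?",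
--                 "How has your approach to work and career evolved over time?",
--                 "Would you like to explore the balance between professional and personal growth?",
--             ]
--         if any(w in q for w in ('creative', 'art', 'creativity', 'expression')) or 'creativity' in detected_topics:
--             yield [
--                 "How does your creativity influence your other areas of interest?",
--                 "What patterns do you see in your creative expression and inspiration?",
--                 "How has your creative process evolved through your conversations?",
--                 "Would you like to explore the connection between creativity and problem-solving?",
--             ]
--         if len(detected_topics) > 2:
--             yield [
--                 "How do your different interests connect and influence each other?",
--                 "What patterns do you see across your various areas of discussion?",
--                 "How does your diverse range of interests contribute to your overall growth?",
--                 "Would you like to explore how your different passions complement each other?",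
--             ]
--         yield [
--             "What trends do you notice in your conversation topics over time?",
--             "How has your approach to learning and exploration evolved?",
--             "What does your conversation history reveal about your core values?",
--             "Would you like to explore specific breakthroughs or turning points in your journey?",
--         ]
--
--     out = []
--     for block in fired_blocks():
--         out.extend(block[:6 - len(out)])
--         if len(out) == 6:
--             break
--     return out
-- ===== Notes on version B (the rewrite author's own statement) =====
-- stated objective: alternative
-- what changed: B exploits that the 36 prompt strings are pairwise distinct (so A's dict.fromkeys dedup is a no-op): it streams the fired blocks through a generator and stops as soon as 6 prompts are collected, never building the full follow_ups list, never deduplicating, and never evaluating the conditions of later blocks once 6 prompts are gathered.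
import Mathlib
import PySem

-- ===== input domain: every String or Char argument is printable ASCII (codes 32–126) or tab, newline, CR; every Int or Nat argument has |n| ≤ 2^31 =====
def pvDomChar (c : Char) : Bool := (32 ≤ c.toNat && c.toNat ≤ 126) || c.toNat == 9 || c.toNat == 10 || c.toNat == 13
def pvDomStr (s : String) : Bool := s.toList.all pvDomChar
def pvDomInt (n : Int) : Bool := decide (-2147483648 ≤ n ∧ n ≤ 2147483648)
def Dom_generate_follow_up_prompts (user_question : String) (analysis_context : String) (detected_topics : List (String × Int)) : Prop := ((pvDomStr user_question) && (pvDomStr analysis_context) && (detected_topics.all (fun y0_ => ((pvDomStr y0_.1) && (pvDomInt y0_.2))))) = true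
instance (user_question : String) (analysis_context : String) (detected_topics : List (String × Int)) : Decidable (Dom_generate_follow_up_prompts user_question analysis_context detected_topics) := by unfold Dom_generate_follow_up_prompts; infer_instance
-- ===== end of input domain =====

-- B streams the fired prompt blocks with an early cut-off at 6 prompts (the 36 prompts
-- are pairwise distinct, so A's dedup is a no-op); alternative decomposition, not claimed faster.


def pvPSent : List String :=
  ["How has your emotional state evolved over time across different topics?",
   "What patterns do you see in your most positive vs challenging conversations?",
   "How does your positive mindset influence your learning and growth patterns?",
   "Would you like to explore the connection between your emotional state and productivity?"]

def pvPProg : List String :=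
  ["How has your programming confidence evolved over time?",
   "What connections do you see between your programming skills and other life areas?",
   "How do your programming discussions reflect your problem-solving approach?",
   "Would you like to analyze your learning progression in specific technologies?"]

def pvPSpir : List String :=
  ["How do your different interests contribute to your personal growth?",
   "What patterns do you see in your self-reflection and learning journey?",
   "How has your perspective on life evolved through your conversations?",
   "Would you like to explore the balance between different aspects of your life?"]

def pvPRel : List String :=
  ["How do your relationship discussions reflect your communication style?",
   "What patterns do you see in your social interactions and connections?",
   "How do your relationships influence your other areas of interest?",
   "Would you like to explore your approach to conflict resolution and understanding?"]

def pvPHealth : List String :=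
  ["How do your health discussions connect to your overall lifestyle patterns?",
   "What does your approach to wellness tell you about your priorities?",
   "How has your understanding of health and wellbeing evolved?",
   "Would you like to explore the connection between physical and mental wellbeing?"]

def pvPBiz : List String :=
  ["How do your business interests align with your personal values?",
   "What patterns do you see in your professional development?",
   "How has your approach to work and career evolved over time?",
   "Would you like to explore the balance between professional and personal growth?"]

def pvPCrea : List String :=
  ["How does your creativity influence your other areas of interest?",
   "What patterns do you see in your creative expression and inspiration?",
   "How has your creative process evolved through your conversations?",
   "Would you like to explore the connection between creativity and problem-solving?"]

def pvPCross : List String :=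
  ["How do your different interests connect and influence each other?",
   "What patterns do you see across your various areas of discussion?",
   "How does your diverse range of interests contribute to your overall growth?",
   "Would you like to explore how your different passions complement each other?"]

def pvPGen : List String :=
  ["What trends do you notice in your conversation topics over time?",
   "How has your approach to learning and exploration evolved?",
   "What does your conversation history reveal about your core values?",
   "Would you like to explore specific breakthroughs or turning points in your journey?"]

-- ===== PORT A =====
-- Literal transliteration of A: seven sequential keyword/topic ifs extending
-- follow_ups, the len>2 cross-topic block, the general block, dict.fromkeys dedup, [:6].
def generate_follow_up_prompts (user_question : String) (analysis_context : String) (detected_topics : List (String × Int)) : List String :=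
  let question_lower := PySem.Str.lower user_question
  let d := PySem.Dict.ofList detected_topics
  let follow_ups : List String := []
  let follow_ups := follow_ups ++ (if (["sentiment", "positive", "negative", "mood", "emotion", "mindset"].any (fun w => PySem.Str.isIn w question_lower)) then pvPSent else [])
  let follow_ups := follow_ups ++ (if (["programming", "code", "technical", "development"].any (fun w => PySem.Str.isIn w question_lower) || d.contains "programming") then pvPProg else [])
  let follow_ups := follow_ups ++ (if (["spiritual", "growth", "development", "personal", "mindset"].any (fun w => PySem.Str.isIn w question_lower) || d.contains "spirituality") then pvPSpir else [])
  let follow_ups := follow_ups ++ (if (["relationship", "social", "connection", "people"].any (fun w => PySem.Str.isIn w question_lower) || d.contains "relationships") then pvPRel else [])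
  let follow_ups := follow_ups ++ (if (["health", "wellness", "fitness", "wellbeing"].any (fun w => PySem.Str.isIn w question_lower) || d.contains "health") then pvPHealth else [])
  let follow_ups := follow_ups ++ (if (["business", "career", "work", "professional"].any (fun w => PySem.Str.isIn w question_lower) || d.contains "business") then pvPBiz else [])
  let follow_ups := follow_ups ++ (if (["creative", "art", "creativity", "expression"].any (fun w => PySem.Str.isIn w question_lower) || d.contains "creativity") then pvPCrea else [])
  let follow_ups := follow_ups ++ (if decide (d.size > 2) then pvPCross else [])
  let follow_ups := follow_ups ++ pvPGen
  (PySem.List.dedup follow_ups).take 6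

-- ===== PORT B =====
-- B's consumer loop: take blocks from the (lazily conditioned) stream, extend by
-- block[:6-len(out)], break as soon as 6 prompts are collected (Source B's for/extend/break).
def pvStream (acc : List String) (blocks : List ((Unit → Bool) × List String)) : List String :=
  match blocks with
  | [] => acc
  | (c, b) :: rest =>
      if c () then
        let acc' := acc ++ b.take (6 - acc.length)
        if acc'.length == 6 then acc' else pvStream acc' rest
      else pvStream acc rest

def generate_follow_up_prompts_alt (user_question : String) (analysis_context : String) (detected_topics : List (String × Int)) : List String :=
  let q := PySem.Str.lower user_question
  let d := PySem.Dict.ofList detected_topics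
  pvStream []
    [(fun _ => ["sentiment", "positive", "negative", "mood", "emotion", "mindset"].any (fun w => PySem.Str.isIn w q), pvPSent),
     (fun _ => ["programming", "code", "technical", "development"].any (fun w => PySem.Str.isIn w q) || d.contains "programming", pvPProg),
     (fun _ => ["spiritual", "growth", "development", "personal", "mindset"].any (fun w => PySem.Str.isIn w q) || d.contains "spirituality", pvPSpir),
     (fun _ => ["relationship", "social", "connection", "people"].any (fun w => PySem.Str.isIn w q) || d.contains "relationships", pvPRel),
     (fun _ => ["health", "wellness", "fitness", "wellbeing"].any (fun w => PySem.Str.isIn w q) || d.contains "health", pvPHealth),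
     (fun _ => ["business", "career", "work", "professional"].any (fun w => PySem.Str.isIn w q) || d.contains "business", pvPBiz),
     (fun _ => ["creative", "art", "creativity", "expression"].any (fun w => PySem.Str.isIn w q) || d.contains "creativity", pvPCrea),
     (fun _ => decide (d.size > 2), pvPCross),
     (fun _ => true, pvPGen)]

-- ===== PRECONDITION & SPEC =====
def Spec_generate_follow_up_prompts (user_question : String) (analysis_context : String) (detected_topics : List (String × Int)) (out : List String) : Prop := out = generate_follow_up_prompts_alt user_question analysis_context detected_topics
instance (user_question : String) (analysis_context : String) (detected_topics : List (String × Int)) (out : List String) : Decidable (Spec_generate_follow_up_prompts user_question analysis_context detected_topics out) := by unfold Spec_generate_follow_up_prompts; infer_instance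

-- ===== CLAIM =====
def Claim_equal_generate_follow_up_prompts : Prop := ∀ (user_question : String) (analysis_context : String) (detected_topics : List (String × Int)), Dom_generate_follow_up_prompts user_question analysis_context detected_topics → Spec_generate_follow_up_prompts user_question analysis_context detected_topics (generate_follow_up_prompts user_question analysis_context detected_topics)

-- ===== LEMMAS AND PROOFS =====

-- if c then P else [] is a sublist of P
theorem pvSelSublist {c : Bool} {P : List String} : (if c then P else []).Sublist P := by
  cases c <;> simp

-- the 36 prompt strings are pairwise distinct
theorem pvNodupFull : (pvPSent ++ (pvPProg ++ (pvPSpir ++ (pvPRel ++ (pvPHealth ++ (pvPBiz ++ (pvPCrea ++ (pvPCross ++ pvPGen)))))))).Nodup := by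
  decide

-- PySem.Set.ofList (= dict.fromkeys dedup) is the identity on nodup lists
theorem pvOfListAux (l : List String) : ∀ (acc : List String), (acc ++ l).Nodup →
    List.foldl PySem.Set.add acc l = acc ++ l := by
  induction l with
  | nil => intro acc _; simp
  | cons x t ih =>
    intro acc h
    have disj := (List.nodup_append.mp h).2.2
    have hx : x ∉ acc := fun hmem => (disj x hmem x (by simp)) rfl
    have hc : PySem.Set.contains acc x = false := by
      simp [PySem.Set.contains]
      exact hx
    simp only [List.foldl_cons, PySem.Set.add, hc]
    rw [if_neg (by simp)]
    rw [ih (acc ++ [x]) (by simpa using h)]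
    simp

theorem pvDedupNodup (l : List String) (h : l.Nodup) : PySem.List.dedup l = l := by
  have := pvOfListAux l [] (by simpa using h)
  simpa [PySem.List.dedup, PySem.Set.ofList, PySem.Set.empty] using this

-- pvStream with early cut-off computes take 6 of the concatenation of fired blocks
theorem pvStreamEq (bs : List ((Unit → Bool) × List String)) : ∀ (acc : List String), acc.length ≤ 6 →
    pvStream acc bs = (acc ++ bs.flatMap (fun p => if p.1 () then p.2 else [])).take 6 := by
  induction bs with
  | nil =>
    intro acc h
    simp [pvStream, List.take_of_length_le h]
  | cons p rest ih =>
    intro acc h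
    obtain ⟨c, b⟩ := p
    simp only [pvStream, List.flatMap_cons]
    by_cases hc : c () = true
    · simp only [hc, if_true]
      by_cases h6 : ((acc ++ List.take (6 - acc.length) b).length == 6) = true
      · rw [if_pos h6]
        have h6' : acc.length + min (6 - acc.length) b.length = 6 := by
          have := beq_iff_eq.mp h6
          simpa [List.length_append, List.length_take] using this
        have h0 : 6 - acc.length - b.length = 0 := by omega
        rw [List.take_append, List.take_of_length_le h, List.take_append, h0]
        simp
      · rw [if_neg h6]
        have hne : acc.length + min (6 - acc.length) b.length ≠ 6 := by
          intro hh
          exact h6 (by simp [List.length_append, List.length_take, hh])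
        have hb : b.length < 6 - acc.length := by omega
        rw [List.take_of_length_le (Nat.le_of_lt hb)]
        rw [ih (acc ++ b) (by simp; omega)]
        simp [List.append_assoc]
    · simp only [hc, Bool.false_eq_true, if_false, List.nil_append]
      exact ih acc h

-- ===== VERDICT =====
set_option maxHeartbeats 1000000 in
theorem generate_follow_up_prompts_spec : Claim_equal_generate_follow_up_prompts := by
  intro uq ac dt _
  unfold Spec_generate_follow_up_prompts
  simp only [generate_follow_up_prompts, generate_follow_up_prompts_alt, List.nil_append]
  rw [pvStreamEq _ [] (by simp)]
  simp only [List.flatMap_cons, List.flatMap_nil, List.nil_append, List.append_nil,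
    if_true, List.append_assoc]
  congr 1
  apply pvDedupNodup
  apply List.Nodup.sublist _ pvNodupFull
  exact List.Sublist.append pvSelSublist (List.Sublist.append pvSelSublist
    (List.Sublist.append pvSelSublist (List.Sublist.append pvSelSublist
    (List.Sublist.append pvSelSublist (List.Sublist.append pvSelSublist
    (List.Sublist.append pvSelSublist (List.Sublist.append pvSelSublist
    (List.Sublist.refl _))))))))
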